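-- pv_equiv track=rewrite | github.com/Risk-boy/sniper-algostudy | 박성현/23년 9월 2주차/종이_접기.py | can_fold
-- ===== SOURCE A (Python) =====
-- def can_fold(s):
--     cur = list(s)
--
--     while len(cur) >= 3:
--         for i in range(2, len(cur), 2):
--             if cur[i-2] == cur[i]:
--                 return False
--
--         nxt = cur[1::2]
--         cur = nxt
--
--     return True
-- ===== SOURCE B (Python) =====
-- def can_fold(s):
--     # Index-arithmetic reformulation: level l of A's folding consists of the
--     # original positions q*m-1 (m = 2**l).  Instead of building sublists we
--     # check the pairs (a, a+2*m) directly on s for doubling strides m.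
--     n = len(s)
--     m = 1
--     while 3 * m <= n:
--         a = m - 1
--         while a + 2 * m < n:
--             if s[a] == s[a + 2 * m]:
--                 return False
--             a += 2 * m
--         m *= 2
--     return True
-- ===== Notes on version B (the rewrite author's own statement) =====
-- stated objective: faster
-- what changed: Instead of materialising each folded level as a new sublist (cur = cur[1::2]) and checking even pairs of the sublist, B never builds any sublist: it walks the original string with a doubling stride m = 1,2,4,..., checking the pairs s[q*m-1] vs s[(q+2)*m-1] in place, so no intermediate lists are allocated.
import Mathlib
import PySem

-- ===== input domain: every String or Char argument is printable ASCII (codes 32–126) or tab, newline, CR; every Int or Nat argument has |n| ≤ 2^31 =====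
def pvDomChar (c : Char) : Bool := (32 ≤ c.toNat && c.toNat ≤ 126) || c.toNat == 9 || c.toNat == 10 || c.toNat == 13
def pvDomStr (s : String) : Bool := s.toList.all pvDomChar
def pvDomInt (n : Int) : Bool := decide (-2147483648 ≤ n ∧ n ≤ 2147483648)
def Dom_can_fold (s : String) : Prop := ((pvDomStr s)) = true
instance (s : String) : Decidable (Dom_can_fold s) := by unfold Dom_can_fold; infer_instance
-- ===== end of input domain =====

-- B changes only the traversal: it checks the same pairs in place on the original
-- string with a doubling stride instead of building each level's sublist (objective: faster, no level copies).

-- ===== PORT A =====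

-- 'for i in range(2, len(cur), 2): if cur[i-2] == cur[i]: return False' — returns
-- false on the first equal pair, true if the loop finishes (indices are in range, so getD is exact)
def pvAInner (cur : List Char) (i : Nat) : Bool :=
  if i < cur.length then
    if cur.getD (i - 2) ' ' == cur.getD i ' ' then false
    else pvAInner cur (i + 2)
  else true
termination_by cur.length - i
decreasing_by exact Nat.sub_lt_sub_left ‹i < cur.length› (Nat.lt_add_of_pos_right (by decide))

-- the 'while len(cur) >= 3' loop; cur[1::2] via slice? (step 2 ≠ 0, so .getD [] is exact).
-- fuel = len(cur) only makes the loop structural: each level is at most half as long as the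
-- previous one, so len(cur) levels can never be exhausted (proved in pvLoop_corr below)
def pvALoop (fuel : Nat) (cur : List Char) : Bool :=
  match fuel with
  | 0 => true
  | fuel + 1 =>
    if 3 ≤ cur.length then
      if pvAInner cur 2 then
        pvALoop fuel ((PySem.List.slice? cur (some 1) none 2).getD [])
      else false
    else true

def can_fold (s : String) : Bool := pvALoop s.toList.length s.toList

-- ===== PORT B =====

-- inner while: 'while a + 2*m < n: if s[a] == s[a+2*m]: return False; a += 2*m'
-- (indices stay in range, so getD is exact; hm only justifies termination)
def pvBInner (cs : List Char) (m : Nat) (hm : 0 < m) (a : Nat) : Bool :=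
  if a + 2 * m < cs.length then
    if cs.getD a ' ' == cs.getD (a + 2 * m) ' ' then false
    else pvBInner cs m hm (a + 2 * m)
  else true
termination_by cs.length - a
decreasing_by
  exact Nat.sub_lt_sub_left (Nat.lt_of_le_of_lt (Nat.le_add_right a (2 * m)) ‹a + 2 * m < cs.length›)
    (Nat.lt_add_of_pos_right (Nat.mul_pos Nat.zero_lt_two hm))

-- outer while: 'while 3*m <= n: … ; m *= 2'
def pvBOuter (cs : List Char) (m : Nat) (hm : 0 < m) : Bool :=
  if 3 * m ≤ cs.length then
    if pvBInner cs m hm (m - 1) then pvBOuter cs (2 * m) (Nat.mul_pos Nat.zero_lt_two hm) else false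
  else true
termination_by cs.length + 1 - m
decreasing_by
  exact Nat.sub_lt_sub_left
    (Nat.lt_succ_of_le (Nat.le_trans (Nat.le_mul_of_pos_left m (by decide)) ‹3 * m ≤ cs.length›))
    (lt_two_mul_self hm)

def can_fold_alt (s : String) : Bool := pvBOuter s.toList 1 Nat.one_pos

-- ===== PRECONDITION & SPEC =====
def Spec_can_fold (s : String) (out : Bool) : Prop := out = can_fold_alt s
instance (s : String) (out : Bool) : Decidable (Spec_can_fold s out) := by unfold Spec_can_fold; infer_instance

-- ===== CLAIM (what is proved, stated in full; the proofs are below) =====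
def Claim_equal_can_fold : Prop := ∀ (s : String), Dom_can_fold s → Spec_can_fold s (can_fold s)

-- ===== LEMMAS AND PROOFS =====

-- cur[1::2] as an explicit list (proof-side view of the slice)
def pvOdds (xs : List Char) : List Char :=
  (List.range (xs.length / 2)).map (fun k => xs.getD (2 * k + 1) ' ')

theorem pvOdds_length (xs : List Char) : (pvOdds xs).length = xs.length / 2 := by
  simp [pvOdds]

-- slice with the literal step 2 never raises: cur[1::2] = some (pvOdds cur)
theorem pvSlice_odds (xs : List Char) :
    PySem.List.slice? xs (some 1) none 2 = some (pvOdds xs) := by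
  unfold PySem.List.slice? PySem.List.sliceIndices
  simp only [pvOdds]
  norm_num
  rcases Nat.eq_zero_or_pos xs.length with h0 | hpos
  · simp [List.eq_nil_of_length_eq_zero h0]
  · have hmin : min (1:Int) ↑xs.length = 1 := by omega
    rw [hmin]
    have hcnt : (if 1 < xs.length then (((xs.length:Int) - 1 + 2 - 1) / 2).toNat else 0) = xs.length / 2 := by
      split_ifs with h1 <;> omega
    rw [hcnt]
    have hmap : ∀ k ∈ List.range (xs.length / 2),
        xs[((1:Int) + 2 * (k:Int)).toNat]? = (some ∘ fun k => xs.getD (2 * k + 1) ' ') k := by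
      intro k hk
      simp only [List.mem_range] at hk
      have hidx : ((1:Int) + 2 * (k:Int)).toNat = 2 * k + 1 := by omega
      have hlt : 2 * k + 1 < xs.length := by omega
      simp [hidx, List.getElem?_eq_getElem hlt, List.getD_eq_getElem?_getD, Function.comp]
    rw [List.filterMap_congr hmap, List.filterMap_eq_map]
    simp [List.getD_eq_getElem?_getD]

theorem pvOdds_getD (xs : List Char) (a : Nat) (ha : a < xs.length / 2) :
    (pvOdds xs).getD a ' ' = xs.getD (2 * a + 1) ' ' := by
  simp [pvOdds, List.getD_eq_getElem?_getD, ha]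

-- A's inner loop at index a+2 is B's stride-1 inner loop at a
theorem pvInner_corr (cs : List Char) (h1 : (0:Nat) < 1) (a : Nat) :
    pvAInner cs (a + 2) = pvBInner cs 1 h1 a := by
  have key : ∀ n a, cs.length - a ≤ n → pvAInner cs (a + 2) = pvBInner cs 1 h1 a := by
    intro n
    induction n with
    | zero =>
      intro a hle
      have hA : ¬ (a + 2 < cs.length) := by omega
      have hB : ¬ (a + 2 * 1 < cs.length) := by omega
      rw [pvAInner, pvBInner, if_neg hA, if_neg hB]
    | succ n ih =>
      intro a hle
      rw [pvAInner]; conv_rhs => rw [pvBInner]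
      by_cases hc : a + 2 < cs.length
      · have hc' : a + 2 * 1 < cs.length := by omega
        rw [if_pos hc, if_pos hc']
        have h3 : a + 2 * 1 = a + 2 := by omega
        have h2 : a + 2 - 2 = a := by omega
        rw [h2, h3]
        split
        · rfl
        · exact ih (a + 2) (by omega)
      · have hc' : ¬ (a + 2 * 1 < cs.length) := by omega
        rw [if_neg hc, if_neg hc']
  exact key cs.length a (by omega)

-- B's inner loop at stride 2m on cs is B's inner loop at stride m on the odd sublist
theorem pvBInner_halve (cs : List Char) (m : Nat) (hm : 0 < m) (h2 : 0 < 2 * m) (a : Nat) :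
    pvBInner cs (2 * m) h2 (2 * a + 1) = pvBInner (pvOdds cs) m hm a := by
  have key : ∀ n a, cs.length - a ≤ n →
      pvBInner cs (2 * m) h2 (2 * a + 1) = pvBInner (pvOdds cs) m hm a := by
    intro n
    induction n with
    | zero =>
      intro a hle
      have hA : ¬ (2 * a + 1 + 2 * (2 * m) < cs.length) := by omega
      have hB : ¬ (a + 2 * m < (pvOdds cs).length) := by rw [pvOdds_length]; omega
      rw [pvBInner, if_neg hA]; rw [pvBInner, if_neg hB]
    | succ n ih =>
      intro a hle
      rw [pvBInner]; conv_rhs => rw [pvBInner]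
      rw [pvOdds_length]
      by_cases hc : a + 2 * m < cs.length / 2
      · have hcA : 2 * a + 1 + 2 * (2 * m) < cs.length := by omega
        rw [if_pos hc, if_pos hcA]
        rw [pvOdds_getD cs a (by omega), pvOdds_getD cs (a + 2 * m) (by omega)]
        have he : 2 * (a + 2 * m) + 1 = 2 * a + 1 + 2 * (2 * m) := by omega
        rw [he]
        split
        · rfl
        · rw [← he]; exact ih (a + 2 * m) (by omega)
      · have hcA : ¬ (2 * a + 1 + 2 * (2 * m) < cs.length) := by omega
        rw [if_neg hc, if_neg hcA]
  exact key cs.length a (by omega)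

theorem pvOuter_halve (cs : List Char) (m : Nat) (hm : 0 < m) (h2 : 0 < 2 * m) :
    pvBOuter cs (2 * m) h2 = pvBOuter (pvOdds cs) m hm := by
  have key : ∀ n m (hm : 0 < m) (h2 : 0 < 2 * m), cs.length + 1 - m ≤ n →
      pvBOuter cs (2 * m) h2 = pvBOuter (pvOdds cs) m hm := by
    intro n
    induction n with
    | zero =>
      intro m hm h2 hle
      have hA : ¬ (3 * (2 * m) ≤ cs.length) := by omega
      have hB : ¬ (3 * m ≤ (pvOdds cs).length) := by rw [pvOdds_length]; omega
      rw [pvBOuter, if_neg hA]; rw [pvBOuter, if_neg hB]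
    | succ n ih =>
      intro m hm h2 hle
      rw [pvBOuter]; conv_rhs => rw [pvBOuter]
      rw [pvOdds_length]
      by_cases hc : 3 * m ≤ cs.length / 2
      · have hcA : 3 * (2 * m) ≤ cs.length := by omega
        rw [if_pos hc, if_pos hcA]
        have hstart : 2 * m - 1 = 2 * (m - 1) + 1 := by omega
        rw [hstart, pvBInner_halve cs m hm h2 (m - 1)]
        split
        · have he : 2 * (2 * m) = 2 * m * 2 := by omega
          have := ih (2 * m) (by omega) (by omega) (by omega)
          rw [this]
        · rfl
      · have hcA : ¬ (3 * (2 * m) ≤ cs.length) := by omega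
        rw [if_neg hc, if_neg hcA]
  exact key (cs.length + 1) m hm h2 (by omega)

theorem pvLoop_corr : ∀ (n : Nat) (cur : List Char) (h1 : (0:Nat) < 1),
    cur.length ≤ n → pvALoop n cur = pvBOuter cur 1 h1 := by
  intro n
  induction n with
  | zero =>
    intro cur h1 hle
    have hB : ¬ (3 * 1 ≤ cur.length) := by omega
    rw [pvALoop, pvBOuter, if_neg hB]
  | succ n ih =>
    intro cur h1 hle
    rw [pvALoop, pvBOuter]
    by_cases hc : 3 ≤ cur.length
    · have hc' : 3 * 1 ≤ cur.length := by omega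
      rw [if_pos hc, if_pos hc']
      have hinner : pvAInner cur 2 = pvBInner cur 1 h1 (1 - 1) := by
        simpa using pvInner_corr cur h1 0
      rw [hinner]
      split
      · rw [pvSlice_odds, Option.getD_some]
        rw [ih (pvOdds cur) h1 (by rw [pvOdds_length]; omega)]
        rw [show pvBOuter cur 2 = pvBOuter cur (2 * 1) from by norm_num,
            pvOuter_halve cur 1 h1 (by omega)]
      · rfl
    · have hc' : ¬ (3 * 1 ≤ cur.length) := by omega
      rw [if_neg hc, if_neg hc']

-- ===== VERDICT (by name: the statement is the Claim_ definition above) =====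
theorem can_fold_spec : Claim_equal_can_fold := by
  intro s _
  unfold Spec_can_fold can_fold can_fold_alt
  exact pvLoop_corr s.toList.length s.toList Nat.one_pos (Nat.le_refl _)
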